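-- pv_equiv track=rewrite | github.com/endy-see/AlgorithmPython | ZuoShen/4-Manacher.py | manacher_str
-- ===== SOURCE A (Python) =====
-- def manacher_str(s):
--     res = [None] * (len(s) * 2 + 1)
--     index = 0
--     for i in range(len(res)):
--         if i & 1 == 0:
--             res[i] = '#'
--         else:
--             res[i] = s[index]
--             index += 1
--
--     return res
-- ===== SOURCE B (Python) =====
-- def manacher_str(s):
--     res = ['#']
--     for c in s:
--         res.append(c)
--         res.append('#')
--     return res
-- ===== Notes on version B (the rewrite author's own statement) =====
-- stated objective: simpler
-- what changed: Iterates over the characters of s, appending each character and a separator, instead of looping over output positions with a parity test and a separately maintained input index; fewer iterations and no per-step branch.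
import Mathlib
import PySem

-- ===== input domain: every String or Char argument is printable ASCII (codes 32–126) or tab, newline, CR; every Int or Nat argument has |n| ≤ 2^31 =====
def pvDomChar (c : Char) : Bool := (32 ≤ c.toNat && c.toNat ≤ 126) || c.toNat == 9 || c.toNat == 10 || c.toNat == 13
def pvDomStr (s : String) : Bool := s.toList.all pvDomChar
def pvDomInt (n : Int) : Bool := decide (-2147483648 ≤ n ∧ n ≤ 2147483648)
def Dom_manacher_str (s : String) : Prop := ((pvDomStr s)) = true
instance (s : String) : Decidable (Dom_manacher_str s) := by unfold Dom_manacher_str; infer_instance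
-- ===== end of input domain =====

set_option maxRecDepth 4000


-- B iterates over the characters of s, appending c and '#' each; A loops over the
-- output positions with a parity test and a separately maintained input index.

-- ===== PORT A =====
-- loop body of A: at position i, write '#' if i is even, else s[index] (always in
-- range when reached, so the getD "" default is never used) and bump index
def manacherStep (cs : List Char) (st : List String × Nat) (i : Nat) : List String × Nat :=
  if i % 2 == 0 then (st.1 ++ ["#"], st.2)
  else (st.1 ++ [((PySem.List.pyGet? cs (st.2 : Int)).map Char.toString).getD ""], st.2 + 1)

def manacher_str (s : String) : List String :=
  ((List.range (s.toList.length * 2 + 1)).foldl (manacherStep s.toList) ([], 0)).1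

-- ===== PORT B =====
def manacher_str_alt (s : String) : List String :=
  s.toList.foldl (fun res c => res ++ [c.toString, "#"]) ["#"]

-- ===== PRECONDITION & SPEC =====
def Spec_manacher_str (s : String) (out : List String) : Prop := out = manacher_str_alt s
instance (s : String) (out : List String) : Decidable (Spec_manacher_str s out) := by unfold Spec_manacher_str; infer_instance

-- ===== CLAIM (what is proved, stated in full; the proofs are below) =====
def Claim_equal_manacher_str : Prop := ∀ (s : String), Dom_manacher_str s → Spec_manacher_str s (manacher_str s)

-- ===== LEMMAS AND PROOFS =====

-- A's loop over range (2m+1), for m ≤ |cs|, produces '#'-interleaved take m and index m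
theorem manacher_aLoop (cs : List Char) (m : Nat) (h : m ≤ cs.length) :
    (List.range (m * 2 + 1)).foldl (manacherStep cs) ([], 0)
      = ("#" :: (cs.take m).flatMap (fun c => [c.toString, "#"]), m) := by
  induction m with
  | zero => simp [List.range_succ, manacherStep]
  | succ k ih =>
    have hk : k < cs.length := by omega
    have : (k + 1) * 2 + 1 = (k * 2 + 1) + 1 + 1 := by ring
    rw [this, List.range_succ, List.foldl_append, List.range_succ, List.foldl_append,
      ih (by omega)]
    have hodd : (k * 2 + 1) % 2 = 1 := by omega
    have heven : (k * 2 + 1 + 1) % 2 = 0 := by omega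
    simp only [List.foldl_cons, List.foldl_nil, manacherStep, hodd, heven]
    norm_num
    have ht : cs.take (k + 1) = cs.take k ++ [cs[k]] := by
      rw [List.take_add_one, List.getElem?_eq_getElem hk]; rfl
    rw [ht, List.flatMap_append, List.getElem?_eq_getElem hk]
    rfl

-- B's fold appends the flatMap of the processed characters
theorem manacher_bLoop (cs : List Char) (acc : List String) :
    cs.foldl (fun res c => res ++ [c.toString, "#"]) acc
      = acc ++ cs.flatMap (fun c => [c.toString, "#"]) :=
  PySem.List.foldl_append_eq_flatMap _ _ _

-- ===== VERDICT (by name: the statement is the Claim_ definition above) =====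
theorem manacher_str_spec : Claim_equal_manacher_str := by
  intro s _
  unfold Spec_manacher_str manacher_str manacher_str_alt
  rw [manacher_aLoop s.toList s.toList.length le_rfl, manacher_bLoop,
    List.take_length]
  simp
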